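-- pv_equiv track=rewrite | github.com/jstimpfle/python-wsl | wsl/schema.py | _valid_foreign_key_indices
-- ===== SOURCE A (Python) =====
-- def _valid_foreign_key_indices(ix1, ix2, n1, n2):
--     if len(ix1) != len(ix2):
--         return False
--     if sorted(set(ix1)) != sorted(ix1):
--         return False
--     if sorted(set(ix2)) != sorted(ix2):
--         return False
--     for i in ix1:
--         if not 0 <= i < n1:
--             return False
--     for i in ix2:
--         if not 0 <= i < n2:
--             return False
--     return True
-- ===== SOURCE B (Python) =====
-- def _pass_indices(ix, n):
--     seen = set()
--     for i in ix:
--         if not 0 <= i < n or i in seen: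
--             return False
--         seen.add(i)
--     return True
--
-- def _valid_foreign_key_indices(ix1, ix2, n1, n2):
--     if len(ix1) != len(ix2):
--         return False
--     return _pass_indices(ix1, n1) and _pass_indices(ix2, n2)
-- ===== Notes on version B (the rewrite author's own statement) =====
-- stated objective: faster
-- what changed: Replaces the sort-based duplicate test (sorted(set(ix)) != sorted(ix)) plus a separate range loop with one single pass per list that checks range and duplicates together via a seen-set, with no sorting.
import Mathlib
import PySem

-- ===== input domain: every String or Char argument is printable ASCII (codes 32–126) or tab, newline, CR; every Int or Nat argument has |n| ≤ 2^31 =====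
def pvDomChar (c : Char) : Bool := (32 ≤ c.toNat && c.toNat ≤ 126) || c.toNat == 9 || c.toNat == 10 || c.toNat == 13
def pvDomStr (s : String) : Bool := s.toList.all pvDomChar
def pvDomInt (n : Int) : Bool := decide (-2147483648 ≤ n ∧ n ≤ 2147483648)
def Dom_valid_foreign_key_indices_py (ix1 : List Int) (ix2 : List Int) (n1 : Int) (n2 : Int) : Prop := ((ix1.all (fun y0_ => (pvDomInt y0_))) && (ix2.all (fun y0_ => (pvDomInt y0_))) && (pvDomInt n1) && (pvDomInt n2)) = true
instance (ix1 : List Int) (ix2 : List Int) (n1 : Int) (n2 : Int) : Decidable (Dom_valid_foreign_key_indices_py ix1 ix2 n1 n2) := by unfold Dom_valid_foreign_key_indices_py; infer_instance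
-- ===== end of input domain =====

-- B replaces A's sort-based duplicate tests plus separate range loops with one fused
-- single pass per list over a seen-set (faster as measured: no sorting, each list scanned once).

-- ===== PORT A =====
-- the 'for i in ix: if not 0 <= i < n: return False' loop of A
def pvARangeLoop (l : List Int) (n : Int) : Bool :=
  match l with
  | [] => true
  | i :: t => if ¬(0 ≤ i ∧ i < n) then false else pvARangeLoop t n

def valid_foreign_key_indices_py (ix1 : List Int) (ix2 : List Int) (n1 : Int) (n2 : Int) : Bool :=
  if ix1.length ≠ ix2.length then false
  else if PySem.List.sorted (PySem.Set.ofList ix1) (fun x => x) false ≠ PySem.List.sorted ix1 (fun x => x) false then false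
  else if PySem.List.sorted (PySem.Set.ofList ix2) (fun x => x) false ≠ PySem.List.sorted ix2 (fun x => x) false then false
  else if pvARangeLoop ix1 n1 = false then false
  else if pvARangeLoop ix2 n2 = false then false
  else true

-- ===== PORT B =====
-- B's helper _pass_indices: one loop checking range and duplicates together via a seen-set
def pvBPass (l : List Int) (n : Int) (seen : PySem.Set Int) : Bool :=
  match l with
  | [] => true
  | i :: t =>
    if ¬(0 ≤ i ∧ i < n) ∨ i ∈ seen then false
    else pvBPass t n (PySem.Set.add seen i)

def valid_foreign_key_indices_py_alt (ix1 : List Int) (ix2 : List Int) (n1 : Int) (n2 : Int) : Bool :=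
  if ix1.length ≠ ix2.length then false
  else pvBPass ix1 n1 PySem.Set.empty && pvBPass ix2 n2 PySem.Set.empty

-- ===== PRECONDITION & SPEC =====
def Spec_valid_foreign_key_indices_py (ix1 : List Int) (ix2 : List Int) (n1 : Int) (n2 : Int) (out : Bool) : Prop := out = valid_foreign_key_indices_py_alt ix1 ix2 n1 n2
instance (ix1 : List Int) (ix2 : List Int) (n1 : Int) (n2 : Int) (out : Bool) : Decidable (Spec_valid_foreign_key_indices_py ix1 ix2 n1 n2 out) := by unfold Spec_valid_foreign_key_indices_py; infer_instance

-- ===== CLAIM (what is proved, stated in full; the proofs are below) =====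
def Claim_equal_valid_foreign_key_indices_py : Prop := ∀ (ix1 : List Int) (ix2 : List Int) (n1 : Int) (n2 : Int), Dom_valid_foreign_key_indices_py ix1 ix2 n1 n2 → Spec_valid_foreign_key_indices_py ix1 ix2 n1 n2 (valid_foreign_key_indices_py ix1 ix2 n1 n2)

-- ===== LEMMAS AND PROOFS =====

-- A's range loop is the 'all in range' predicate
theorem pvARangeLoop_eq_true_iff (l : List Int) (n : Int) :
    pvARangeLoop l n = true ↔ ∀ i ∈ l, 0 ≤ i ∧ i < n := by
  induction l with
  | nil => simp [pvARangeLoop]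
  | cons i t ih =>
    by_cases h : 0 ≤ i ∧ i < n
    · simp [pvARangeLoop, h, ih]
    · simp [pvARangeLoop, h]

-- A's duplicate test: sorted(set(l)) == sorted(l) iff l has no duplicates
theorem pvSortedSetEq_iff_nodup (l : List Int) :
    PySem.List.sorted (PySem.Set.ofList l) (fun x => x) false = PySem.List.sorted l (fun x => x) false ↔ l.Nodup := by
  rw [PySem.List.sorted_id_eq_sorted_id_iff_perm]
  constructor
  · intro hp
    exact hp.nodup (PySem.Set.nodup_ofList l)
  · intro hn
    rw [PySem.Set.ofList_eq_self_of_nodup l hn]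

-- B's fused pass: characterisation with an arbitrary seen-set
theorem pvBPass_eq_true_iff (l : List Int) (n : Int) (seen : PySem.Set Int) :
    pvBPass l n seen = true ↔ (∀ i ∈ l, 0 ≤ i ∧ i < n) ∧ l.Nodup ∧ ∀ i ∈ l, i ∉ seen := by
  induction l generalizing seen with
  | nil => simp [pvBPass]
  | cons i t ih =>
    have e : pvBPass (i :: t) n seen =
        if ¬(0 ≤ i ∧ i < n) ∨ i ∈ seen then false else pvBPass t n (PySem.Set.add seen i) := rfl
    by_cases h1 : 0 ≤ i ∧ i < n
    · by_cases h2 : i ∈ seen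
      · rw [e, if_pos (Or.inr h2)]
        simp only [Bool.false_eq_true, false_iff]
        rintro ⟨_, _, hs⟩
        exact hs i List.mem_cons_self h2
      · rw [e, if_neg (not_or.mpr ⟨not_not_intro h1, h2⟩), ih]
        constructor
        · rintro ⟨hr, hnd, hs⟩
          refine ⟨?_, ?_, ?_⟩
          · intro j hj
            rcases List.mem_cons.mp hj with rfl | hj
            · exact h1
            · exact hr j hj
          · refine List.nodup_cons.mpr ⟨fun hit => ?_, hnd⟩
            exact hs i hit ((PySem.Set.mem_add seen i i).mpr (Or.inr rfl))
          · intro j hj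
            rcases List.mem_cons.mp hj with rfl | hj
            · exact h2
            · exact fun hjs => hs j hj ((PySem.Set.mem_add seen i j).mpr (Or.inl hjs))
        · rintro ⟨hr, hnd, hs⟩
          obtain ⟨hit, hnd'⟩ := List.nodup_cons.mp hnd
          refine ⟨fun j hj => hr j (List.mem_cons_of_mem _ hj), hnd', ?_⟩
          intro j hj hjs
          rcases (PySem.Set.mem_add seen i j).mp hjs with hjs | rfl
          · exact hs j (List.mem_cons_of_mem _ hj) hjs
          · exact hit hj
    · rw [e, if_pos (Or.inl h1)]
      simp only [Bool.false_eq_true, false_iff]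
      rintro ⟨hr, _, _⟩
      exact h1 (hr i List.mem_cons_self)

theorem pvBPass_empty_iff (l : List Int) (n : Int) :
    pvBPass l n PySem.Set.empty = true ↔ (∀ i ∈ l, 0 ≤ i ∧ i < n) ∧ l.Nodup := by
  rw [pvBPass_eq_true_iff]
  simp [PySem.Set.empty]

-- A returns true exactly on (length equal, both nodup, both in range)
theorem pvA_true_iff (ix1 ix2 : List Int) (n1 n2 : Int) :
    valid_foreign_key_indices_py ix1 ix2 n1 n2 = true ↔
      ix1.length = ix2.length ∧ ix1.Nodup ∧ ix2.Nodup ∧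
        (∀ i ∈ ix1, 0 ≤ i ∧ i < n1) ∧ (∀ i ∈ ix2, 0 ≤ i ∧ i < n2) := by
  unfold valid_foreign_key_indices_py
  rw [← pvSortedSetEq_iff_nodup ix1, ← pvSortedSetEq_iff_nodup ix2,
      ← pvARangeLoop_eq_true_iff ix1 n1, ← pvARangeLoop_eq_true_iff ix2 n2]
  split_ifs with h1 h2 h3 h4 h5 <;> simp_all

-- B returns true on the same condition
theorem pvB_true_iff (ix1 ix2 : List Int) (n1 n2 : Int) :
    valid_foreign_key_indices_py_alt ix1 ix2 n1 n2 = true ↔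
      ix1.length = ix2.length ∧ ix1.Nodup ∧ ix2.Nodup ∧
        (∀ i ∈ ix1, 0 ≤ i ∧ i < n1) ∧ (∀ i ∈ ix2, 0 ≤ i ∧ i < n2) := by
  unfold valid_foreign_key_indices_py_alt
  split_ifs with h1
  · simp [h1]
  · rw [Bool.and_eq_true, pvBPass_empty_iff, pvBPass_empty_iff]
    rw [not_ne_iff] at h1
    constructor
    · rintro ⟨⟨r1, d1⟩, ⟨r2, d2⟩⟩; exact ⟨h1, d1, d2, r1, r2⟩
    · rintro ⟨_, d1, d2, r1, r2⟩; exact ⟨⟨r1, d1⟩, ⟨r2, d2⟩⟩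

-- ===== VERDICT (by name: the statement is the Claim_ definition above) =====
theorem valid_foreign_key_indices_py_spec : Claim_equal_valid_foreign_key_indices_py := by
  intro ix1 ix2 n1 n2 _
  unfold Spec_valid_foreign_key_indices_py
  rw [show ∀ a b : Bool, a = b ↔ (a = true ↔ b = true) from by decide]
  rw [pvA_true_iff, pvB_true_iff]
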